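-- pv_equiv track=rewrite | github.com/JBlazing/Keras-Model-Remote-Viewer | src/fileLoader.py | parse_Filenames
-- ===== SOURCE A (Python) =====
-- def parse_Filenames(filesList):
--
--     X = []
--     Y = []
--     Y_Idxs = []
--     y_index = 0
--     for item in filesList:
--         models = item[ :-1]
--         target = item[-1]
--         t = [ y_index for x in models]
--         X += models
--         Y.append(target)
--         Y_Idxs += t
--         y_index += 1
--
--     return X,Y,Y_Idxs
-- ===== SOURCE B (Python) =====
-- def parse_Filenames(filesList):
--     # Structural recursion: no counter -- the tail's group indices are shifted by +1.
--     if not filesList: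
--         return [], [], []
--     item, rest = filesList[0], filesList[1:]
--     Xs, Ys, Is = parse_Filenames(rest)
--     models = item[:-1]
--     return (models + Xs,
--             [item[-1]] + Ys,
--             [0] * len(models) + [i + 1 for i in Is])
-- ===== Notes on version B (the rewrite author's own statement) =====
-- stated objective: alternative
-- what changed: Replaces A's single forward loop with mutable accumulators and an explicit group counter by structural recursion on the list: the head's contribution is prepended to the recursive result and the tail's group indices are shifted by +1, so no counter is maintained.
import Mathlib
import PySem

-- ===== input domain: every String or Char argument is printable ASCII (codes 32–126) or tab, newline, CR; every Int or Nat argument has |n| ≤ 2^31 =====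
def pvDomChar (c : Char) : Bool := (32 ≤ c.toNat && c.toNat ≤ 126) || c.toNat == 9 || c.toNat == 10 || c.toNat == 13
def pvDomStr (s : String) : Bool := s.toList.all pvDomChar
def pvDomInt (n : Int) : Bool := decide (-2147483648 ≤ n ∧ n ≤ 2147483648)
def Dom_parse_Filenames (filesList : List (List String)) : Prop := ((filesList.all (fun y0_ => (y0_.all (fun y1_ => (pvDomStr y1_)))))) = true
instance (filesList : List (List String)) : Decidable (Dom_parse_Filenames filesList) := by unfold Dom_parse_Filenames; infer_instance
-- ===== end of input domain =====

-- B replaces A's single forward loop with a group counter by structural recursion on the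
-- list, prepending the head's contribution and shifting the tail's group indices by +1
-- (alternative decomposition, no counter; not claimed faster).


-- ===== PORT A =====
-- A: one loop keeping mutable X, Y, Y_Idxs and a counter y_index; item[-1] is total only
-- under Pre_ (item nonempty), ported as pyGetD with a dummy default never used inside Pre_.
def parse_Filenames (filesList : List (List String)) : List String × List String × List Int :=
  let st := filesList.foldl
    (fun (st : List String × List String × List Int × Int) item =>
      let models := PySem.List.slice item none (some (-1))
      let target := PySem.List.pyGetD item (-1) ""
      let t := models.map (fun _ => st.2.2.2)
      (st.1 ++ models, st.2.1 ++ [target], st.2.2.1 ++ t, st.2.2.2 + 1))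
    ([], [], [], 0)
  (st.1, st.2.1, st.2.2.1)

-- ===== PORT B =====
-- B: structural recursion; the head's models/target are prepended and the tail's group
-- indices are shifted by +1 (no counter).
def parse_Filenames_alt (filesList : List (List String)) : List String × List String × List Int :=
  match filesList with
  | [] => ([], [], [])
  | item :: rest =>
    let r := parse_Filenames_alt rest
    let models := PySem.List.slice item none (some (-1))
    (models ++ r.1,
     PySem.List.pyGetD item (-1) "" :: r.2.1,
     models.map (fun _ => (0 : Int)) ++ r.2.2.map (· + 1))

-- ===== PRECONDITION & SPEC =====
-- Pre_ excludes inputs containing an empty sublist: there both Pythons raise IndexError on item[-1].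
def Pre_parse_Filenames (filesList : List (List String)) : Prop :=
  ∀ item ∈ filesList, item ≠ []
instance (filesList : List (List String)) : Decidable (Pre_parse_Filenames filesList) := by
  unfold Pre_parse_Filenames; infer_instance
def pvWitness_parse_Filenames : List (List String) := [["a", "b", "c"], ["d"]]

def Spec_parse_Filenames (filesList : List (List String)) (out : List String × List String × List Int) : Prop := out = parse_Filenames_alt filesList
instance (filesList : List (List String)) (out : List String × List String × List Int) : Decidable (Spec_parse_Filenames filesList out) := by unfold Spec_parse_Filenames; infer_instance

-- ===== CLAIM (what is proved, stated in full; the proofs are below) =====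
def Claim_equal_parse_Filenames : Prop := ∀ (filesList : List (List String)), Dom_parse_Filenames filesList → Pre_parse_Filenames filesList → Spec_parse_Filenames filesList (parse_Filenames filesList)

-- ===== LEMMAS AND PROOFS =====

-- The index component of B, as a closed form: group indices enumerated from k.
def pvIdxF (k : Int) (l : List (List String)) : List Int :=
  (PySem.List.enumerate l k).flatMap
    (fun p => (PySem.List.slice p.2 none (some (-1))).map (fun _ => p.1))

theorem pvIdxF_shift (l : List (List String)) (k : Int) :
    (pvIdxF k l).map (· + 1) = pvIdxF (k + 1) l := by
  induction l generalizing k with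
  | nil => simp [pvIdxF]
  | cons hd tl ih =>
    simp only [pvIdxF, PySem.List.enumerate_cons, List.flatMap_cons, List.map_append,
      List.map_map] at *
    rw [ih]
    simp [Function.comp_def, List.map_const]

-- B equals the closed form (flatten, lasts, indices from 0).
theorem parse_Filenames_alt_eq (l : List (List String)) :
    parse_Filenames_alt l
    = (l.flatMap (fun item => PySem.List.slice item none (some (-1))),
       l.map (fun item => PySem.List.pyGetD item (-1) ""),
       pvIdxF 0 l) := by
  induction l with
  | nil => simp [parse_Filenames_alt, pvIdxF]
  | cons hd tl ih =>
    simp only [parse_Filenames_alt, ih, pvIdxF, PySem.List.enumerate_cons,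
      List.flatMap_cons, List.map_cons]
    have := pvIdxF_shift tl 0
    simp only [pvIdxF] at this
    rw [this]

-- A's loop, from an arbitrary accumulator state, appends the same three closed forms
-- (indices enumerated from the current counter).
theorem parse_Filenames_foldl_char (filesList : List (List String))
    (x y : List String) (z : List Int) (k : Int) :
    filesList.foldl
      (fun (st : List String × List String × List Int × Int) item =>
        let models := PySem.List.slice item none (some (-1))
        let target := PySem.List.pyGetD item (-1) ""
        let t := models.map (fun _ => st.2.2.2)
        (st.1 ++ models, st.2.1 ++ [target], st.2.2.1 ++ t, st.2.2.2 + 1))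
      (x, y, z, k)
    = (x ++ filesList.flatMap (fun item => PySem.List.slice item none (some (-1))),
       y ++ filesList.map (fun item => PySem.List.pyGetD item (-1) ""),
       z ++ pvIdxF k filesList,
       k + filesList.length) := by
  induction filesList generalizing x y z k with
  | nil => simp [pvIdxF]
  | cons hd tl ih =>
    simp only [List.foldl_cons, ih, pvIdxF, PySem.List.enumerate_cons, List.flatMap_cons,
      List.map_cons, List.append_assoc, List.length_cons, Prod.mk.injEq]
    and_intros <;> first | trivial | (push_cast; ring)

-- ===== VERDICT (by name: the statement is the Claim_ definition above) =====
theorem parse_Filenames_spec : Claim_equal_parse_Filenames := by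
  intro filesList _ _
  unfold Spec_parse_Filenames parse_Filenames
  simp only [parse_Filenames_foldl_char, parse_Filenames_alt_eq, List.nil_append]
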